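-- pv_equiv track=rewrite | github.com/OnGitHab/Homework | 10.2.py | first_word
-- ===== SOURCE A (Python) =====
-- import string
--
-- def first_word(text):
--     word_chars = f"{string.ascii_lowercase}{string.ascii_uppercase}'"
--     word_lst = []
--     text.lstrip(" .,")
--     for char in text:
--         if char in word_chars:
--             word_lst.append(char)
--         elif word_lst:
--             break
--
--     return "".join(word_lst)
-- ===== SOURCE B (Python) =====
-- import string
--
--
-- def first_word(text):
--     # Two-pointer scan: find the start index of the first word, then its end,
--     # and return the slice -- no accumulator list is built.
--     word = frozenset(string.ascii_letters + "'")
--     i = 0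
--     while i < len(text) and text[i] not in word:
--         i += 1
--     j = i
--     while j < len(text) and text[j] in word:
--         j += 1
--     return text[i:j]
-- ===== Notes on version B (the rewrite author's own statement) =====
-- stated objective: alternative
-- what changed: Replaces A's accumulate-then-break character loop (building a list and joining it) with a two-pointer scan that locates the start and end indices of the first word and returns the slice.
import Mathlib
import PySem

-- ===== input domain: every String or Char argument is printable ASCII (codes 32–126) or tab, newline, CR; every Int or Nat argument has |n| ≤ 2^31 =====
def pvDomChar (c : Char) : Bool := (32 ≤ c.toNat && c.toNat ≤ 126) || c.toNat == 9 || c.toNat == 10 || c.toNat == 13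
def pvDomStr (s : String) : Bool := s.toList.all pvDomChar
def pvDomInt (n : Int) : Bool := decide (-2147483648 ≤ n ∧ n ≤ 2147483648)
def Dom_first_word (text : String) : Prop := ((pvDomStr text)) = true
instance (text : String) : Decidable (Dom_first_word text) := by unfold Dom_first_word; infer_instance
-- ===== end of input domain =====

-- B replaces A's accumulate-then-break loop with a two-pointer scan returning a slice (alternative decomposition, same cost).

-- ===== PORT A =====
-- word_chars = ascii_lowercase + ascii_uppercase + "'"
def wordChars : List Char := "abcdefghijklmnopqrstuvwxyzABCDEFGHIJKLMNOPQRSTUVWXYZ'".toList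

-- the for-loop: append word chars to word_lst, break at the first non-word char once word_lst is nonempty.
-- (A's 'text.lstrip(" .,")' discards its result and has no effect; nothing to port for it.)
def firstWordGo (l : List Char) (wordLst : List Char) : List Char :=
  match l with
  | [] => wordLst
  | c :: rest =>
    if c ∈ wordChars then firstWordGo rest (wordLst ++ [c])
    else if wordLst ≠ [] then wordLst
    else firstWordGo rest wordLst

def first_word (text : String) : String :=
  String.mk (firstWordGo text.toList [])

-- ===== PORT B =====
def wordSet : PySem.Set Char := PySem.Set.ofList wordChars

-- while i < len(text) and text[i] not in word: i += 1
def altSkip (l : List Char) (i : Nat) : Nat :=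
  if h : i < l.length then
    if PySem.Set.contains wordSet l[i] then i else altSkip l (i + 1)
  else i
termination_by l.length - i

-- while j < len(text) and text[j] in word: j += 1
def altGrab (l : List Char) (j : Nat) : Nat :=
  if h : j < l.length then
    if PySem.Set.contains wordSet l[j] then altGrab l (j + 1) else j
  else j
termination_by l.length - j

def first_word_alt (text : String) : String :=
  let l := text.toList
  let i := altSkip l 0
  let j := altGrab l i
  -- text[i:j] with 0 ≤ i ≤ j ≤ len: exact as drop i, take (j - i)
  String.mk ((l.drop i).take (j - i))

-- ===== PRECONDITION & SPEC =====
def Spec_first_word (text : String) (out : String) : Prop := out = first_word_alt text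
instance (text : String) (out : String) : Decidable (Spec_first_word text out) := by unfold Spec_first_word; infer_instance

-- ===== CLAIM (what is proved, stated in full; the proofs are below) =====
def Claim_equal_first_word : Prop := ∀ (text : String), Dom_first_word text → Spec_first_word text (first_word text)

-- ===== LEMMAS AND PROOFS =====
def isW (c : Char) : Bool := decide (c ∈ wordChars)

theorem contains_wordSet (c : Char) : PySem.Set.contains wordSet c = isW c := by
  simp [wordSet, isW, PySem.Set.contains_iff, PySem.Set.mem_ofList]

-- A's loop once the accumulator is nonempty: takeWhile
theorem firstWordGo_ne (l acc : List Char) (h : acc ≠ []) :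
    firstWordGo l acc = acc ++ l.takeWhile isW := by
  induction l generalizing acc with
  | nil => simp [firstWordGo]
  | cons c rest ih =>
    by_cases hc : c ∈ wordChars
    · have : isW c = true := by simpa [isW] using hc
      simp [firstWordGo, hc, List.takeWhile_cons, this, ih (acc ++ [c]) (by simp)]
    · have : isW c = false := by simpa [isW] using hc
      simp [firstWordGo, hc, h, List.takeWhile_cons, this]

-- A's result in closed form
theorem firstWordGo_eq (l : List Char) :
    firstWordGo l [] = (l.dropWhile (fun c => !isW c)).takeWhile isW := by
  induction l with
  | nil => simp [firstWordGo]
  | cons c rest ih =>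
    by_cases hc : c ∈ wordChars
    · have hw : isW c = true := by simpa [isW] using hc
      simp [firstWordGo, hc, List.dropWhile_cons, hw, List.takeWhile_cons,
        firstWordGo_ne rest [c] (by simp)]
    · have hw : isW c = false := by simpa [isW] using hc
      simp [firstWordGo, hc, List.dropWhile_cons, hw, ih]

theorem altSkip_le (l : List Char) (i : Nat) (h : i ≤ l.length) : altSkip l i ≤ l.length := by
  unfold altSkip
  split
  · split
    · omega
    · exact altSkip_le l (i + 1) (by omega)
  · omega
termination_by l.length - i

theorem altGrab_ge (l : List Char) (j : Nat) : j ≤ altGrab l j := by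
  unfold altGrab
  split
  · split
    · have := altGrab_ge l (j + 1); omega
    · omega
  · omega
termination_by l.length - j

-- the skip loop lands on the dropWhile suffix
theorem drop_altSkip (l : List Char) (i : Nat) :
    l.drop (altSkip l i) = (l.drop i).dropWhile (fun c => !isW c) := by
  unfold altSkip
  split
  · rename_i h
    split
    · rename_i hw
      rw [contains_wordSet] at hw
      rw [List.drop_eq_getElem_cons h]
      simp only [List.dropWhile_cons, hw]
      simp
    · rename_i hw
      rw [contains_wordSet] at hw
      simp only [Bool.not_eq_true] at hw
      rw [drop_altSkip l (i + 1)]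
      conv_rhs => rw [List.drop_eq_getElem_cons h, List.dropWhile_cons]
      simp [hw]
  · rename_i h
    simp [List.drop_eq_nil_of_le (by omega : l.length ≤ i)]
termination_by l.length - i

-- the grab loop takes exactly the takeWhile prefix of the suffix
theorem take_altGrab (l : List Char) (j : Nat) :
    (l.drop j).take (altGrab l j - j) = (l.drop j).takeWhile isW := by
  unfold altGrab
  split
  · rename_i h
    split
    · rename_i hw
      rw [contains_wordSet] at hw
      have hge := altGrab_ge l (j + 1)
      have hs : altGrab l (j + 1) - j = (altGrab l (j + 1) - (j + 1)) + 1 := by omega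
      rw [List.drop_eq_getElem_cons h, hs]
      simp only [List.take_succ_cons, List.takeWhile_cons, hw]
      simp [take_altGrab l (j + 1)]
    · rename_i hw
      rw [contains_wordSet] at hw
      simp only [Bool.not_eq_true] at hw
      rw [List.drop_eq_getElem_cons h]
      simp [List.takeWhile_cons, hw]
  · rename_i h
    simp [List.drop_eq_nil_of_le (by omega : l.length ≤ j)]
termination_by l.length - j

-- ===== VERDICT (by name: the statement is the Claim_ definition above) =====
theorem first_word_spec : Claim_equal_first_word := by
  intro text _
  unfold Spec_first_word first_word first_word_alt
  show String.mk (firstWordGo text.toList []) =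
    String.mk ((text.toList.drop (altSkip text.toList 0)).take
      (altGrab text.toList (altSkip text.toList 0) - altSkip text.toList 0))
  rw [firstWordGo_eq, take_altGrab]
  have h := drop_altSkip text.toList 0
  rw [List.drop_zero] at h
  rw [← h]
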